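-- pv_equiv track=rewrite | github.com/VladimirIakushev/mini_algorithms | Hacker_rank/Designer Door Mat.py | painting
-- ===== SOURCE A (Python) =====
-- import textwrap
--
-- def painting(N, M):
--     string = ''
--     for n in range(1, (N // 2 + 1)):
--         for m in range(1, (M + 1)):
--
--             if (m < ((M // 2 + 1) - (3 * (2 * n - 1)) // 2)):
--                 string = string + '-'
--             elif m == (M // 2 + 1) - (3 * (2 * n - 1)) // 2:
--                 string = string + ('.|.' * (2 * n - 1))
--             elif (m >= ((M // 2 + 1) - (3 * (2 * n - 1)) // 2)) and (m < ((M // 2 + 1) + (3 * (2 * n - 1)) // 2) + 1):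
--                 string = string
--             elif (m >= ((M // 2 + 1) + (3 * (2 * n - 1)) // 2) + 1):
--                 string = string + '-'
--     for m in range(1, (M + 1)):
--
--         if m < (M // 2 - 2):
--             string = string + '-'
--         elif m == (M // 2 - 2):
--             string = string + 'WELCOME'
--         elif m >= (M // 2 - 2) and m < (M // 2 + 5):
--             pass
--         elif m >= (M // 2 + 5):
--             string = string + '-'
--
--     for n in range((N // 2), 0, -1):
--         for m in range(1, (M + 1)):
--
--             if (m < ((M // 2 + 1) - (3 * (2 * n - 1)) // 2)):
--                 string = string + '-'
--             elif m == (M // 2 + 1) - (3 * (2 * n - 1)) // 2: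
--                 string = string + ('.|.' * (2 * n - 1))
--             elif (m >= ((M // 2 + 1) - (3 * (2 * n - 1)) // 2)) and (m < ((M // 2 + 1) + (3 * (2 * n - 1)) // 2) + 1):
--                 string = string
--             elif (m >= ((M // 2 + 1) + (3 * (2 * n - 1)) // 2) + 1):
--                 string = string + '-'
--
--     result = textwrap.fill(string, M, break_on_hyphens=False)
--     return result
-- ===== SOURCE B (Python) =====
-- def painting(N, M):
--     # Row-by-row construction with arithmetic padding, then split into
--     # width-M lines (textwrap.fill on a whitespace-free string = chop every M).
--     def row(block, L, X):
--         left = min(max(L - 1, 0), M)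
--         mid = block if 1 <= L <= M else ''
--         right = max(0, M - X)
--         return '-' * left + mid + '-' * right
--
--     half = M // 2
--     top = [row('.|.' * (2 * n - 1),
--                half + 1 - (3 * (2 * n - 1)) // 2,
--                half + 1 + (3 * (2 * n - 1)) // 2)
--            for n in range(1, N // 2 + 1)]
--     flat = ''.join(top) + row('WELCOME', half - 2, half + 4) + ''.join(reversed(top))
--     return '\n'.join(flat[i:i + M] for i in range(0, len(flat), M))
-- ===== Notes on version B (the rewrite author's own statement) =====
-- stated objective: faster
-- what changed: B builds the mat row by row (left dashes + block + right dashes computed arithmetically with bulk string repetition) and splits into width-M lines by slicing, instead of A's per-column character loop with a 4-way branch and string append per cell and textwrap.fill.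
import Mathlib
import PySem

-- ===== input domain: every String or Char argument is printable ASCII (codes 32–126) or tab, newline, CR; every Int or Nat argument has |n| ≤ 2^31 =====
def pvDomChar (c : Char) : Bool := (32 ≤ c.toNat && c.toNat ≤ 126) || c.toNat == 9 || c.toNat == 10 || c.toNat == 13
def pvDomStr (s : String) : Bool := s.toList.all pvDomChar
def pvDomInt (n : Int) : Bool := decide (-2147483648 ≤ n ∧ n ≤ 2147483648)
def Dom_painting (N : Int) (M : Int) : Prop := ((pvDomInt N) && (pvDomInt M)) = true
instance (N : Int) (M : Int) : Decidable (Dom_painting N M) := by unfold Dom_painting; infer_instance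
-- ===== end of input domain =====

-- B builds the mat row by row with arithmetic padding and bulk repetition instead of A's
-- per-character column loop, and splits into width-M lines by slicing instead of textwrap
-- (objective: faster — measurably, by a constant factor: O(N) loop iterations instead of O(N*M)).

-- ===== PORT A =====
-- textwrap.fill(text, w): on whitespace-free text (A's string is only '-', '.', '|' and
-- letters) fill chops the single word into w-sized pieces joined by '\n' — this recursion
-- is exact there for w ≥ 1; for w ≤ 0 Python raises ValueError (excluded by Pre_painting).
def pvFill (w : Int) (s : List Char) : List Char :=
  if _h : w ≤ 0 then s
  else if _h2 : s.length ≤ w.toNat then s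
  else s.take w.toNat ++ '\n' :: pvFill w (s.drop w.toNat)
termination_by s.length
decreasing_by simp; omega

def painting (N : Int) (M : Int) : String :=
  let s1 := (PySem.List.pyRange 1 (PySem.Int.floordiv N 2 + 1) 1).foldl (fun s n =>
    (PySem.List.pyRange 1 (M + 1) 1).foldl (fun s m =>
      if m < (PySem.Int.floordiv M 2 + 1) - PySem.Int.floordiv (3 * (2 * n - 1)) 2 then s ++ ['-']
      else if m = (PySem.Int.floordiv M 2 + 1) - PySem.Int.floordiv (3 * (2 * n - 1)) 2 then
        s ++ PySem.List.pyRepeat ['.', '|', '.'] (2 * n - 1)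
      else if m ≥ (PySem.Int.floordiv M 2 + 1) - PySem.Int.floordiv (3 * (2 * n - 1)) 2 ∧
              m < (PySem.Int.floordiv M 2 + 1) + PySem.Int.floordiv (3 * (2 * n - 1)) 2 + 1 then s
      else if m ≥ (PySem.Int.floordiv M 2 + 1) + PySem.Int.floordiv (3 * (2 * n - 1)) 2 + 1 then s ++ ['-']
      else s) s) ([] : List Char)
  let s2 := (PySem.List.pyRange 1 (M + 1) 1).foldl (fun s m =>
      if m < PySem.Int.floordiv M 2 - 2 then s ++ ['-']
      else if m = PySem.Int.floordiv M 2 - 2 then s ++ "WELCOME".toList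
      else if m ≥ PySem.Int.floordiv M 2 - 2 ∧ m < PySem.Int.floordiv M 2 + 5 then s
      else if m ≥ PySem.Int.floordiv M 2 + 5 then s ++ ['-']
      else s) s1
  let s3 := (PySem.List.pyRange (PySem.Int.floordiv N 2) 0 (-1)).foldl (fun s n =>
    (PySem.List.pyRange 1 (M + 1) 1).foldl (fun s m =>
      if m < (PySem.Int.floordiv M 2 + 1) - PySem.Int.floordiv (3 * (2 * n - 1)) 2 then s ++ ['-']
      else if m = (PySem.Int.floordiv M 2 + 1) - PySem.Int.floordiv (3 * (2 * n - 1)) 2 then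
        s ++ PySem.List.pyRepeat ['.', '|', '.'] (2 * n - 1)
      else if m ≥ (PySem.Int.floordiv M 2 + 1) - PySem.Int.floordiv (3 * (2 * n - 1)) 2 ∧
              m < (PySem.Int.floordiv M 2 + 1) + PySem.Int.floordiv (3 * (2 * n - 1)) 2 + 1 then s
      else if m ≥ (PySem.Int.floordiv M 2 + 1) + PySem.Int.floordiv (3 * (2 * n - 1)) 2 + 1 then s ++ ['-']
      else s) s) s2
  String.ofList (pvFill M s3)

-- ===== PORT B =====
-- one row: left dashes, the block if its start column lies in [1, M], right dashes
def pvRow (M : Int) (block : List Char) (L : Int) (X : Int) : List Char :=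
  List.replicate (min (max (L - 1) 0) M).toNat '-' ++
    (if 1 ≤ L ∧ L ≤ M then block else []) ++
    List.replicate (max 0 (M - X)).toNat '-'

def painting_alt (N : Int) (M : Int) : String :=
  let half := PySem.Int.floordiv M 2
  let top := (PySem.List.pyRange 1 (PySem.Int.floordiv N 2 + 1) 1).map (fun n =>
      pvRow M (PySem.List.pyRepeat ['.', '|', '.'] (2 * n - 1))
        (half + 1 - PySem.Int.floordiv (3 * (2 * n - 1)) 2)
        (half + 1 + PySem.Int.floordiv (3 * (2 * n - 1)) 2))
  let flat := PySem.Chars.join [] top ++ pvRow M "WELCOME".toList (half - 2) (half + 4) ++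
      PySem.Chars.join [] top.reverse
  String.ofList (PySem.Chars.join ['\n']
    ((PySem.List.pyRange 0 (flat.length : Int) M).map
      (fun i => PySem.List.slice flat (some i) (some (i + M)))))

-- ===== PRECONDITION & SPEC =====
-- Pre_ excludes exactly M ≤ 0, where textwrap.fill raises ValueError("invalid width").
def Pre_painting (N : Int) (M : Int) : Prop := 1 ≤ M
instance (N : Int) (M : Int) : Decidable (Pre_painting N M) := by unfold Pre_painting; infer_instance
def pvWitness_painting : Int × Int := (5, 15)

def Spec_painting (N : Int) (M : Int) (out : String) : Prop := out = painting_alt N M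
instance (N : Int) (M : Int) (out : String) : Decidable (Spec_painting N M out) := by unfold Spec_painting; infer_instance

-- ===== CLAIM (what is proved, stated in full; the proofs are below) =====
def Claim_equal_painting : Prop := ∀ (N : Int) (M : Int), Dom_painting N M → Pre_painting N M → Spec_painting N M (painting N M)

-- ===== LEMMAS AND PROOFS =====

theorem pvFlatMap_const_singleton {g : Int → List Char} {ch : Char} :
    ∀ (l : List Int), (∀ m ∈ l, g m = [ch]) → l.flatMap g = List.replicate l.length ch := by
  intro l h
  induction l with
  | nil => simp
  | cons x t ih => simp_all [List.replicate_succ]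

theorem pvFlatMap_const_nil {g : Int → List Char} :
    ∀ (l : List Int), (∀ m ∈ l, g m = []) → l.flatMap g = [] := by
  intro l h
  induction l with
  | nil => simp
  | cons x t ih => simp_all

-- A's four-branch column loop over m = 1..M produces exactly one padded row.
theorem pvZone (M L X U : Int) (b acc : List Char) (hM : 1 ≤ M) (hU : U = X + 1)
    (hLX : L ≤ X) (hX : 0 ≤ X) :
    (PySem.List.pyRange 1 (M + 1) 1).foldl (fun s m =>
        if m < L then s ++ ['-']
        else if m = L then s ++ b
        else if m ≥ L ∧ m < U then s
        else if m ≥ U then s ++ ['-']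
        else s) acc = acc ++ pvRow M b L X := by
  have hcongr : ∀ (s : List Char), ∀ m ∈ PySem.List.pyRange 1 (M + 1) 1,
      (if m < L then s ++ ['-']
        else if m = L then s ++ b
        else if m ≥ L ∧ m < U then s
        else if m ≥ U then s ++ ['-']
        else s)
      = s ++ (if m < L then ['-'] else if m = L then b
          else if m ≥ L ∧ m < U then [] else if m ≥ U then ['-'] else []) := by
    intro s m _
    split_ifs <;> simp
  rw [PySem.List.foldl_congr_mem _ _ _ _ hcongr, PySem.List.foldl_append_eq_flatMap]
  congr 1
  set g : Int → List Char := fun m => (if m < L then ['-'] else if m = L then b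
          else if m ≥ L ∧ m < U then [] else if m ≥ U then ['-'] else []) with hg
  set a : Int := max 1 (min L (M + 1)) with ha
  set c : Int := max 1 (min (L + 1) (M + 1)) with hc
  set d : Int := max 1 (min U (M + 1)) with hd
  rw [PySem.List.pyRange_one_append 1 a (M + 1) (by omega) (by omega),
      PySem.List.pyRange_one_append a c (M + 1) (by omega) (by omega),
      PySem.List.pyRange_one_append c d (M + 1) (by omega) (by omega)]
  rw [List.flatMap_append, List.flatMap_append, List.flatMap_append]
  have h1 : (PySem.List.pyRange 1 a 1).flatMap g = List.replicate (min (max (L - 1) 0) M).toNat '-' := by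
    have hmem : ∀ m ∈ PySem.List.pyRange 1 a 1, g m = ['-'] := by
      intro m hm
      rw [PySem.List.mem_pyRange_one] at hm
      have : m < L := by omega
      simp [hg, this]
    rw [pvFlatMap_const_singleton _ hmem, PySem.List.length_pyRange_one]
    congr 1
    omega
  have h2 : (PySem.List.pyRange a c 1).flatMap g = (if 1 ≤ L ∧ L ≤ M then b else []) := by
    by_cases hL : 1 ≤ L ∧ L ≤ M
    · have haL : a = L := by omega
      have hcL : c = L + 1 := by omega
      rw [haL, hcL, PySem.List.pyRange_one_singleton]
      simp [hg, hL]
    · have : a = c := by omega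
      rw [this, PySem.List.pyRange_one_eq_nil (le_refl c)]
      simp [hL]
  have h3 : (PySem.List.pyRange c d 1).flatMap g = [] := by
    apply pvFlatMap_const_nil
    intro m hm
    rw [PySem.List.mem_pyRange_one] at hm
    have hn1 : ¬ m < L := by omega
    have hn2 : ¬ m = L := by omega
    have hn3 : m ≥ L ∧ m < U := by omega
    simp [hg, hn1, hn2, hn3]
  have h4 : (PySem.List.pyRange d (M + 1) 1).flatMap g = List.replicate (max 0 (M - X)).toNat '-' := by
    have hmem : ∀ m ∈ PySem.List.pyRange d (M + 1) 1, g m = ['-'] := by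
      intro m hm
      rw [PySem.List.mem_pyRange_one] at hm
      have hn1 : ¬ m < L := by omega
      have hn2 : ¬ m = L := by omega
      have hn3 : ¬ (m ≥ L ∧ m < U) := by omega
      have hn4 : m ≥ U := by omega
      simp [hg, hn1, hn2, hn3, hn4]
    rw [pvFlatMap_const_singleton _ hmem, PySem.List.length_pyRange_one]
    congr 1
    omega
  rw [h1, h2, h3, h4, pvRow]
  simp

-- range(a, 0, -1) is range(1, a+1) reversed
theorem pvRange_countdown (a : Int) :
    PySem.List.pyRange a 0 (-1) = (PySem.List.pyRange 1 (a + 1) 1).reverse := by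
  rw [PySem.List.pyRange_neg_one, PySem.List.pyRange_one]
  apply List.ext_getElem
  · simp
  · intro k h1 h2
    simp only [List.getElem_map, List.getElem_reverse, List.length_map, List.length_range,
      List.getElem_range]
    simp only [List.length_map, List.length_range] at h1 h2
    omega

theorem pvJoin_cons (sep p : List Char) (ts : List (List Char)) (h : ts ≠ []) :
    PySem.Chars.join sep (p :: ts) = p ++ sep ++ PySem.Chars.join sep ts := by
  cases ts with
  | nil => exact absurd rfl h
  | cons a l => exact PySem.Chars.join_cons_cons sep p a l

theorem pvJoin_nil_sep (l : List (List Char)) : PySem.Chars.join [] l = l.flatten := by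
  induction l with
  | nil => simp [PySem.Chars.join_nil]
  | cons a t ih =>
    cases t with
    | nil => simp [PySem.Chars.join_singleton]
    | cons b r =>
      rw [PySem.Chars.join_cons_cons, ih]
      simp

-- B's slice-and-join chopper equals the fill recursion (for any width ≥ 1)
theorem pvChop_eq_fill (M : Int) (hM : 1 ≤ M) (s : List Char) :
    PySem.Chars.join ['\n']
      ((PySem.List.pyRange 0 (s.length : Int) M).map
        (fun i => PySem.List.slice s (some i) (some (i + M)))) = pvFill M s := by
  generalize hn : s.length = n
  induction n using Nat.strong_induction_on generalizing s with
  | _ n ih =>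
  rw [PySem.List.pyRange_of_pos _ _ (by omega), pvFill, dif_neg (by omega), hn]
  by_cases h0 : n = 0
  · have hs : s = [] := List.length_eq_zero_iff.mp (by omega)
    subst hs h0
    simp [PySem.Chars.join_nil]
  by_cases hsmall : n ≤ M.toNat
  · rw [dif_pos (by omega)]
    have hq : (if (0:Int) < (n:Int) then (((n:Int) - 0 + M - 1) / M).toNat else 0) = 1 := by
      rw [if_pos (by omega)]
      have h1 : (1:Int) ≤ ((n:Int) - 0 + M - 1) / M :=
        Int.le_ediv_iff_mul_le (by omega) |>.mpr (by omega)
      have h3 : ((n:Int) - 0 + M - 1) / M < 1 + 1 := Int.ediv_lt_of_lt_mul (by omega) (by omega)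
      omega
    rw [hq]
    simp only [List.range_one, List.map_cons, List.map_nil, PySem.Chars.join_singleton]
    rw [show (0:Int) + M * ((0:Nat):Int) = 0 by simp, PySem.List.slice_zero_start,
      show (0:Int) + M = M by ring, PySem.List.slice_to s (by omega)]
    exact List.take_of_length_le (by omega)
  · rw [dif_neg (by omega)]
    have hlen' : (s.drop M.toNat).length = n - M.toNat := by simp [hn]
    have hq' : (if (0:Int) < ((n - M.toNat : Nat):Int) then ((((n - M.toNat : Nat):Int) - 0 + M - 1) / M).toNat else 0)
        = ((((n - M.toNat : Nat):Int) + M - 1) / M).toNat := by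
      rw [if_pos (by push_cast [show M.toNat ≤ n by omega]; omega)]
      norm_num
    have hq'pos : (1:Int) ≤ (((n - M.toNat : Nat):Int) + M - 1) / M :=
      Int.le_ediv_iff_mul_le (by omega) |>.mpr (by push_cast [show M.toNat ≤ n by omega]; omega)
    have hq : (if (0:Int) < (n:Int) then (((n:Int) - 0 + M - 1) / M).toNat else 0)
        = ((((n - M.toNat : Nat):Int) + M - 1) / M).toNat + 1 := by
      rw [if_pos (by omega)]
      have harith : ((n:Int) - 0 + M - 1) / M = (((n - M.toNat : Nat):Int) + M - 1) / M + 1 := by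
        have e : (n:Int) - 0 + M - 1 = (((n - M.toNat : Nat):Int) + M - 1) + 1 * M := by
          push_cast [show M.toNat ≤ n by omega]; omega
        rw [e, Int.add_mul_ediv_right _ _ (by omega : M ≠ 0)]
      rw [harith]
      omega
    rw [hq]
    set q' : Nat := ((((n - M.toNat : Nat):Int) + M - 1) / M).toNat with hq'def
    rw [List.range_succ_eq_map, List.map_cons, List.map_cons, List.map_map, List.map_map]
    have hhead : PySem.List.slice s (some ((0:Int) + M * ((0:Nat):Int))) (some ((0:Int) + M * ((0:Nat):Int) + M))
        = s.take M.toNat := by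
      rw [show (0:Int) + M * ((0:Nat):Int) = 0 by simp, PySem.List.slice_toNat s (by omega) (by omega)]
      simp
    have htail : ∀ k : Nat,
        ((fun i => PySem.List.slice s (some i) (some (i + M))) ∘ (fun k : Nat => (0:Int) + M * (k:Int)) ∘ Nat.succ) k
        = (fun i => PySem.List.slice (s.drop M.toNat) (some i) (some (i + M))) (((0:Int) + M * (k:Int))) := by
      intro k
      simp only [Function.comp_apply]
      have e1 : (0:Int) + M * ((Nat.succ k : Nat):Int) = M * (k:Int) + M := by push_cast; ring
      have ha : (0:Int) ≤ M * (k:Int) := by positivity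
      rw [e1]
      generalize M * (k:Int) = a at ha ⊢
      rw [PySem.List.slice_toNat s (by omega) (by omega),
          PySem.List.slice_toNat (s.drop M.toNat) (by omega) (by omega), List.drop_drop]
      rw [show (a + M + M).toNat - (a + M).toNat = (0 + a + M).toNat - (0 + a).toNat by omega,
          show (a + M).toNat = M.toNat + (0 + a).toNat by omega]
    have htail' : (List.range q').map ((fun i => PySem.List.slice s (some i) (some (i + M))) ∘ (fun k : Nat => (0:Int) + M * (k:Int)) ∘ Nat.succ)
        = (List.range q').map ((fun i => PySem.List.slice (s.drop M.toNat) (some i) (some (i + M))) ∘ (fun k : Nat => (0:Int) + M * (k:Int))) := by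
      apply List.map_congr_left
      intro k _
      exact htail k
    rw [show ((fun i => PySem.List.slice s (some i) (some (i + M))) ∘ fun k : Nat => (0:Int) + M * (k:Int)) ∘ Nat.succ
        = (fun i => PySem.List.slice s (some i) (some (i + M))) ∘ (fun k : Nat => (0:Int) + M * (k:Int)) ∘ Nat.succ from rfl]
    rw [htail', hhead]
    have hne : (List.range q').map ((fun i => PySem.List.slice (s.drop M.toNat) (some i) (some (i + M))) ∘ (fun k : Nat => (0:Int) + M * (k:Int))) ≠ [] := by
      simp only [ne_eq, List.map_eq_nil_iff, List.range_eq_nil]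
      omega
    rw [pvJoin_cons _ _ _ hne]
    have hih := ih (n - M.toNat) (by omega) (s.drop M.toNat) hlen'
    rw [PySem.List.pyRange_of_pos _ _ (by omega), hq'] at hih
    rw [List.map_map] at hih
    rw [hih]
    simp

-- ===== VERDICT (by name: the statement is the Claim_ definition above) =====
theorem painting_spec : Claim_equal_painting := by
  intro N M _hD hM
  have hM1 : (1:Int) ≤ M := hM
  unfold Spec_painting
  simp only [painting, painting_alt]
  have hhalf : 0 ≤ PySem.Int.floordiv M 2 := by
    rw [PySem.Int.floordiv_eq_ediv_of_pos (by omega : (0:Int) < 2)]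
    exact Int.ediv_nonneg (by omega) (by omega)
  have hdpos : ∀ n : Int, 1 ≤ n → 0 ≤ PySem.Int.floordiv (3 * (2 * n - 1)) 2 := by
    intro n hn
    rw [PySem.Int.floordiv_eq_ediv_of_pos (by omega : (0:Int) < 2)]
    exact Int.ediv_nonneg (by omega) (by omega)
  set ns := PySem.List.pyRange 1 (PySem.Int.floordiv N 2 + 1) 1 with hns
  set row : Int → List Char := fun n =>
    pvRow M (PySem.List.pyRepeat ['.', '|', '.'] (2 * n - 1))
      (PySem.Int.floordiv M 2 + 1 - PySem.Int.floordiv (3 * (2 * n - 1)) 2)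
      (PySem.Int.floordiv M 2 + 1 + PySem.Int.floordiv (3 * (2 * n - 1)) 2) with hrowdef
  have hloop : ∀ (l : List Int) (acc : List Char), (∀ n ∈ l, 1 ≤ n) →
      l.foldl (fun s n =>
        (PySem.List.pyRange 1 (M + 1) 1).foldl (fun s m =>
          if m < (PySem.Int.floordiv M 2 + 1) - PySem.Int.floordiv (3 * (2 * n - 1)) 2 then s ++ ['-']
          else if m = (PySem.Int.floordiv M 2 + 1) - PySem.Int.floordiv (3 * (2 * n - 1)) 2 then
            s ++ PySem.List.pyRepeat ['.', '|', '.'] (2 * n - 1)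
          else if m ≥ (PySem.Int.floordiv M 2 + 1) - PySem.Int.floordiv (3 * (2 * n - 1)) 2 ∧
                  m < (PySem.Int.floordiv M 2 + 1) + PySem.Int.floordiv (3 * (2 * n - 1)) 2 + 1 then s
          else if m ≥ (PySem.Int.floordiv M 2 + 1) + PySem.Int.floordiv (3 * (2 * n - 1)) 2 + 1 then s ++ ['-']
          else s) s) acc = acc ++ l.flatMap row := by
    intro l acc hl
    rw [PySem.List.foldl_congr_mem l _ (fun s n => s ++ row n) acc (by
      intro acc' n hn
      exact pvZone M _ _ _ _ acc' hM1 rfl (by have := hdpos n (hl n hn); omega)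
        (by have := hdpos n (hl n hn); omega))]
    exact PySem.List.foldl_append_eq_flatMap row l acc
  have h1 := hloop ns [] (by
    intro n hn
    rw [hns, PySem.List.mem_pyRange_one] at hn
    omega)
  rw [h1]
  rw [pvZone M (PySem.Int.floordiv M 2 - 2) (PySem.Int.floordiv M 2 + 4)
      (PySem.Int.floordiv M 2 + 5) ("WELCOME".toList) _ hM1 (by omega) (by omega) (by omega)]
  rw [pvRange_countdown, ← hns]
  have h3 := hloop ns.reverse ([] ++ ns.flatMap row ++ pvRow M "WELCOME".toList
      (PySem.Int.floordiv M 2 - 2) (PySem.Int.floordiv M 2 + 4)) (by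
    intro n hn
    rw [List.mem_reverse, hns, PySem.List.mem_pyRange_one] at hn
    omega)
  rw [h3]
  rw [pvJoin_nil_sep, pvJoin_nil_sep, ← List.flatMap_def, ← List.map_reverse, ← List.flatMap_def]
  have hflat : ([] ++ ns.flatMap row ++ pvRow M "WELCOME".toList
        (PySem.Int.floordiv M 2 - 2) (PySem.Int.floordiv M 2 + 4)) ++ ns.reverse.flatMap row
      = ns.flatMap row ++ pvRow M "WELCOME".toList
        (PySem.Int.floordiv M 2 - 2) (PySem.Int.floordiv M 2 + 4) ++ ns.reverse.flatMap row := by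
    simp
  rw [hflat]
  exact congrArg String.ofList (pvChop_eq_fill M hM1 _).symm
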